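-- pv_equiv track=rewrite | github.com/ManuTorrado/FCEyN-IP | CMS2 - Imperativo/mesetaMasLarga.py | hayMesetaDeLong
-- ===== SOURCE A (Python) =====
-- from typing import List
--
-- def hayMesetaDeLong(l: List[int], n: int) -> bool:
--     res: bool = False
--     count: int = 0
--     x: int = 0
--
--     while (count < len(l)):
--         if (x <= count):
--             if (n == count-x+1 and todosIguales(l, x, count)):
--                 res = True
--                 break
--             x += 1
--         else:
--             count += 1
--             x = 0
--
--     return res
--
-- def todosIguales(l: List[int], i: int, j: int) -> bool:
--     res: bool = True
--     for x in range(i, j+1):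
--         if (not (l[x] == l[i])):
--             res = False
--             break
--
--     return res
-- ===== SOURCE B (Python) =====
-- from typing import List
--
-- def hayMesetaDeLong(l: List[int], n: int) -> bool:
--     best = 0
--     cur = 0
--     prev = None
--     for v in l:
--         cur = cur + 1 if prev == v else 1
--         prev = v
--         best = max(best, cur)
--     return 1 <= n <= best
-- ===== Notes on version B (the rewrite author's own statement) =====
-- stated objective: faster
-- what changed: Replaced A's triple-nested scan over all (start,end) window pairs with re-verification of each window by a single left-to-right pass that tracks the current and maximal consecutive-equal run length, returning 1 <= n <= maxRun.
import Mathlib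
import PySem

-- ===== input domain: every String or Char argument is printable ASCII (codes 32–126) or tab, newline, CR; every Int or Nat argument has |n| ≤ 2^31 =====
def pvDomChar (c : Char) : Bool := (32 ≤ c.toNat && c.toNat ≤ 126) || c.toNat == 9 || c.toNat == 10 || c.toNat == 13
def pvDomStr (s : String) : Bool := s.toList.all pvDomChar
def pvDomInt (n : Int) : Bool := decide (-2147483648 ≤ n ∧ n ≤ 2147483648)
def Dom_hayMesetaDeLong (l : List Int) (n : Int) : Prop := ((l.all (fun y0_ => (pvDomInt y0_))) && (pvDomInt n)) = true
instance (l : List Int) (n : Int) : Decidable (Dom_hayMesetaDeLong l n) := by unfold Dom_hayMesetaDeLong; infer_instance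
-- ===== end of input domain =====

-- B replaces A's triple-nested scan over all (start,end) windows by one left-to-right pass
-- tracking the current and maximal consecutive-equal run length (objective: faster).

-- ===== PORT A =====
-- helper todosIguales: 'for x in range(i, j+1): if not l[x] == l[i]: res=False; break'.
-- l[x]/l[i] are ported with pyGet?; in A's only call site 0 ≤ i ≤ x ≤ j < len(l), so both
-- indices are always in range and the IndexError case (pyGet? = none) is unreachable;
-- comparing the two Options is then exactly Python's l[x] == l[i].
def tiLoop (l : List Int) (i : Int) : List Int → Bool
  | [] => true
  | x :: rest =>
    if ¬ (PySem.List.pyGet? l x = PySem.List.pyGet? l i) then false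
    else tiLoop l i rest

def todosIguales (l : List Int) (i j : Int) : Bool :=
  tiLoop l i (PySem.List.pyRange i (j + 1) 1)

-- A's while-loop, state (count, x); it terminates because x rises until it passes count,
-- and then count rises towards len(l)
def aLoop (l : List Int) (n : Int) (count x : Int) : Bool :=
  if h : count < (l.length : Int) then
    if x ≤ count then
      if n == count - x + 1 && todosIguales l x count then true
      else aLoop l n count (x + 1)
    else aLoop l n (count + 1) 0
  else false
  termination_by ((((l.length : Int) + 1 - count).toNat, (count + 1 - x).toNat) : Nat × Nat)
  decreasing_by
  · apply Prod.Lex.right' <;> omega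
  · apply Prod.Lex.left; omega

def hayMesetaDeLong (l : List Int) (n : Int) : Bool :=
  aLoop l n 0 0

-- ===== PORT B =====
-- loop body of B: cur = cur + 1 if prev == v else 1; prev = v; best = max(best, cur)
def stepB (s : Int × Int × Option Int) (v : Int) : Int × Int × Option Int :=
  let cur := if s.2.2 = some v then s.2.1 + 1 else 1
  (max s.1 cur, cur, some v)

-- B: one pass; return 1 <= n <= best
def hayMesetaDeLong_alt (l : List Int) (n : Int) : Bool :=
  let s := l.foldl stepB (0, 0, none)
  decide (1 ≤ n ∧ n ≤ s.1)

-- ===== PRECONDITION & SPEC =====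
def Spec_hayMesetaDeLong (l : List Int) (n : Int) (out : Bool) : Prop := out = hayMesetaDeLong_alt l n
instance (l : List Int) (n : Int) (out : Bool) : Decidable (Spec_hayMesetaDeLong l n out) := by unfold Spec_hayMesetaDeLong; infer_instance

-- ===== CLAIM (what is proved, stated in full; the proofs are below) =====
def Claim_equal_hayMesetaDeLong : Prop := ∀ (l : List Int) (n : Int), Dom_hayMesetaDeLong l n → Spec_hayMesetaDeLong l n (hayMesetaDeLong l n)

-- ===== LEMMAS AND PROOFS =====

-- a constant window of l: indices a..b (inclusive), every entry equal to the one at a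
def Win (l : List Int) (a b : Nat) : Prop :=
  a ≤ b ∧ b < l.length ∧ ∀ k : Nat, a ≤ k → k ≤ b → l[k]? = l[a]?

-- the last m entries of l are all equal
def Suff (l : List Int) (m : Nat) : Prop :=
  ∀ k : Nat, l.length - m ≤ k → k < l.length → l[k]? = l[l.length - m]?

lemma tiLoop_iff (l : List Int) (i : Int) (ks : List Int) :
    tiLoop l i ks = true ↔ ∀ k ∈ ks, PySem.List.pyGet? l k = PySem.List.pyGet? l i := by
  induction ks with
  | nil => simp [tiLoop]
  | cons k ks ih => by_cases h : PySem.List.pyGet? l k = PySem.List.pyGet? l i <;>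
      simp [tiLoop, h, ih]

lemma todosIguales_iff (l : List Int) (a b : Nat) :
    todosIguales l (a : Int) (b : Int) = true ↔ ∀ k : Nat, a ≤ k → k ≤ b → l[k]? = l[a]? := by
  unfold todosIguales
  rw [tiLoop_iff]
  constructor
  · intro h k hak hkb
    have := h (k : Int) (by rw [PySem.List.mem_pyRange_one]; omega)
    simpa [PySem.List.pyGet?_natCast] using this
  · intro h k hk
    rw [PySem.List.mem_pyRange_one] at hk
    have hcast : k = ((k.toNat : Nat) : Int) := by omega
    rw [hcast]
    simp only [PySem.List.pyGet?_natCast]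
    exact h k.toNat (by omega) (by omega)

lemma todosIguales_iff' (l : List Int) (x count : Int) (hx : 0 ≤ x) (hc : 0 ≤ count) :
    todosIguales l x count = true ↔
      ∀ k : Nat, x.toNat ≤ k → k ≤ count.toNat → l[k]? = l[x.toNat]? := by
  have h1 : x = ((x.toNat : Nat) : Int) := by omega
  have h2 : count = ((count.toNat : Nat) : Int) := by omega
  rw [h1, h2, todosIguales_iff]
  simp only [Int.toNat_natCast]

lemma aLoop_iff (l : List Int) (n : Int) :
    ∀ μ : Nat, ∀ count : Int, (((l.length : Int) + 1 - count).toNat = μ) →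
      0 ≤ count → count ≤ (l.length : Int) →
      ∀ κ : Nat, ∀ x : Int, ((count + 1 - x).toNat = κ) → 0 ≤ x →
      (aLoop l n count x = true ↔
        ∃ a b : Nat, Win l a b ∧ (count < (b : Int) ∨ ((b : Int) = count ∧ x ≤ (a : Int))) ∧
          n = (b : Int) - (a : Int) + 1) := by
  intro μ
  induction μ using Nat.strong_induction_on with
  | _ μ ihμ =>
  intro count hμ hc0 hcL κ
  induction κ using Nat.strong_induction_on with
  | _ κ ihκ =>
  intro x hκ hx0
  rw [aLoop]
  split_ifs with h1 h2 h3
  · -- hit: condition true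
    simp only [true_iff]
    simp only [Bool.and_eq_true, beq_iff_eq] at h3
    obtain ⟨hn, hti⟩ := h3
    refine ⟨x.toNat, count.toNat, ⟨by omega, by omega, ?_⟩, Or.inr ⟨by omega, by omega⟩, by omega⟩
    exact (todosIguales_iff' l x count hx0 hc0).mp hti
  · -- condition false: recurse on x+1
    rw [ihκ (count - x).toNat (by omega) (x + 1) (by omega) (by omega)]
    simp only [Bool.and_eq_true, beq_iff_eq, not_and] at h3
    constructor
    · rintro ⟨a, b, hw, hside, hn⟩
      exact ⟨a, b, hw, by omega, hn⟩
    · rintro ⟨a, b, hw, hside, hn⟩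
      refine ⟨a, b, hw, ?_, hn⟩
      rcases hside with h | ⟨hb, hxa⟩
      · exact Or.inl h
      · -- b = count, x ≤ a; if a = x we contradict h3
        by_cases hax : x + 1 ≤ (a : Int)
        · exact Or.inr ⟨hb, hax⟩
        · exfalso
          have hax' : (a : Int) = x := by omega
          have hnn : n = count - x + 1 := by omega
          have hti : todosIguales l x count = true := by
            rw [todosIguales_iff' l x count hx0 hc0]
            intro k hk1 hk2
            have := hw.2.2 k (by omega) (by omega)
            have hanchor : x.toNat = a := by omega
            rw [hanchor]
            exact this
          exact absurd hti (by simpa using h3 hnn)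
  · -- x > count: recurse on count+1
    rw [ihμ ((l.length : Int) - count).toNat (by omega) (count + 1) (by omega) (by omega)
        (by omega) (count + 2).toNat 0 (by omega) (by omega)]
    constructor
    · rintro ⟨a, b, hw, hside, hn⟩
      refine ⟨a, b, hw, Or.inl (by omega), hn⟩
    · rintro ⟨a, b, hw, hside, hn⟩
      refine ⟨a, b, hw, ?_, hn⟩
      have hab : a ≤ b := hw.1
      rcases hside with h | ⟨hb, hxa⟩
      · by_cases hbc : (b : Int) = count + 1
        · exact Or.inr ⟨hbc, by omega⟩
        · exact Or.inl (by omega)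
      · exfalso; omega
  · -- count ≥ len: loop ends, no window qualifies
    simp only [false_iff, not_exists]
    rintro a b ⟨⟨hab, hbL, _⟩, hside, _⟩
    omega

lemma A_iff (l : List Int) (n : Int) :
    hayMesetaDeLong l n = true ↔ ∃ a b : Nat, Win l a b ∧ n = (b : Int) - (a : Int) + 1 := by
  unfold hayMesetaDeLong
  rw [aLoop_iff l n (((l.length : Int) + 1 - 0).toNat) 0 rfl (by omega) (by omega)
      ((0 + 1 - 0 : Int)).toNat 0 rfl (by omega)]
  constructor
  · rintro ⟨a, b, hw, -, hn⟩
    exact ⟨a, b, hw, hn⟩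
  · rintro ⟨a, b, hw, hn⟩
    refine ⟨a, b, hw, ?_, hn⟩
    by_cases hb : (b : Int) = 0
    · exact Or.inr ⟨hb, by omega⟩
    · exact Or.inl (by omega)

lemma foldB (l : List Int) :
    (l.foldl stepB (0, 0, none)).2.2 = l.getLast? ∧
    (0 ≤ (l.foldl stepB (0, 0, none)).2.1 ∧ (l.foldl stepB (0, 0, none)).2.1 ≤ (l.foldl stepB (0, 0, none)).1) ∧
    (∀ m : Nat, 1 ≤ m → (((m : Int) ≤ (l.foldl stepB (0, 0, none)).2.1) ↔ (m ≤ l.length ∧ Suff l m))) ∧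
    (∀ m : Nat, 1 ≤ m → (((m : Int) ≤ (l.foldl stepB (0, 0, none)).1) ↔ ∃ a b : Nat, Win l a b ∧ b + 1 - a = m)) := by
  induction l using List.reverseRecOn with
  | nil =>
    refine ⟨rfl, ⟨le_refl _, le_refl _⟩, ?_, ?_⟩
    · intro m hm
      simp only [List.foldl_nil]
      constructor
      · intro h; exfalso; omega
      · rintro ⟨h, -⟩; exfalso; simp at h; omega
    · intro m hm
      simp only [List.foldl_nil]
      constructor
      · intro h; exfalso; omega
      · rintro ⟨a, b, ⟨-, hb, -⟩, -⟩; simp at hb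
  | append_singleton xs v ih =>
    obtain ⟨hP1, ⟨hc0, hcb⟩, hP3, hP4⟩ := ih
    rw [List.foldl_append]
    set s := xs.foldl stepB (0, 0, none) with hs
    have hlen : (xs ++ [v]).length = xs.length + 1 := by simp
    have hidxL : ∀ k : Nat, k < xs.length → (xs ++ [v])[k]? = xs[k]? := by
      intro k hk; rw [List.getElem?_append_left hk]
    have hidxV : (xs ++ [v])[xs.length]? = some v := by
      simp
    have hstep : List.foldl stepB s [v] = (max s.1 (if s.2.2 = some v then s.2.1 + 1 else 1),
        (if s.2.2 = some v then s.2.1 + 1 else 1), some v) := by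
      simp [stepB]
    rw [hstep]
    set c1 : Int := if s.2.2 = some v then s.2.1 + 1 else 1 with hc1
    have hc1pos : 1 ≤ c1 := by
      rw [hc1]; split_ifs <;> omega
    have hsuff1 : Suff (xs ++ [v]) 1 := by
      intro k hk1 hk2
      simp only [hlen] at hk1 hk2 ⊢
      have hkeq : k = xs.length := by omega
      have he : xs.length + 1 - 1 = xs.length := by omega
      rw [hkeq, he]
    have hG3 : ∀ m : Nat, 1 ≤ m → (((m : Int) ≤ c1) ↔ (m ≤ (xs ++ [v]).length ∧ Suff (xs ++ [v]) m)) := by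
      intro m hm
      rcases Nat.eq_or_lt_of_le hm with h1 | h2
      · subst h1
        simp only [Nat.cast_one, hlen]
        exact iff_of_true hc1pos ⟨by omega, hsuff1⟩
      · have hm2 : 2 ≤ m := h2
        by_cases hp : s.2.2 = some v
        · have hxsne : xs ≠ [] := by
            intro h; rw [h] at hP1; rw [hP1] at hp; simp at hp
          have hL1 : 1 ≤ xs.length := by
            cases xs with
            | nil => exact absurd rfl hxsne
            | cons a as => simp
          have hlast : xs[xs.length - 1]? = some v := by
            rw [← List.getLast?_eq_getElem?, ← hP1, hp]
          rw [hc1, if_pos hp]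
          have hiter : ((m : Int) ≤ s.2.1 + 1) ↔ ((m - 1 : Nat) : Int) ≤ s.2.1 := by
            constructor <;> intro h <;> omega
          rw [hiter, hP3 (m - 1) (by omega), hlen]
          constructor
          · rintro ⟨hmL, hsf⟩
            refine ⟨by omega, ?_⟩
            intro k hk1 hk2
            simp only [hlen] at hk1 hk2 ⊢
            have he : xs.length + 1 - m = xs.length - (m - 1) := by omega
            rw [he] at hk1 ⊢
            rw [hidxL (xs.length - (m - 1)) (by omega)]
            by_cases hkL : k < xs.length
            · rw [hidxL k hkL]
              exact hsf k (by omega) hkL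
            · have hkeq : k = xs.length := by omega
              rw [hkeq, hidxV]
              rw [← hsf (xs.length - 1) (by omega) (by omega), hlast]
          · rintro ⟨hmL, hsf⟩
            refine ⟨by omega, ?_⟩
            intro k hk1 hk2
            have h1 := hsf k (by simp only [hlen]; omega) (by simp only [hlen]; omega)
            simp only [hlen] at h1
            rw [hidxL k (by omega), hidxL (xs.length + 1 - m) (by omega)] at h1
            have he : xs.length - (m - 1) = xs.length + 1 - m := by omega
            rw [he]
            exact h1
        · rw [hc1, if_neg hp]
          constructor
          · intro h; exfalso; omega
          · rintro ⟨hmL, hsf⟩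
            exfalso
            simp only [hlen] at hmL
            have hL1 : 1 ≤ xs.length := by omega
            have hlastv : xs[xs.length - 1]? = some v := by
              have h1 := hsf (xs.length - 1) (by simp only [hlen]; omega) (by simp only [hlen]; omega)
              have h2 := hsf xs.length (by simp only [hlen]; omega) (by simp only [hlen]; omega)
              rw [hidxL (xs.length - 1) (by omega)] at h1
              rw [hidxV] at h2
              rw [h1, ← h2]
            apply hp
            rw [hP1, List.getLast?_eq_getElem?]
            exact hlastv
    refine ⟨by simp, ⟨?_, ?_⟩, hG3, ?_⟩
    · show (0:Int) ≤ c1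
      omega
    · show c1 ≤ max s.1 c1
      exact le_max_right _ _
    · intro m hm
      show ((m:Int) ≤ max s.1 c1) ↔ _
      rw [le_max_iff, hP4 m hm, hG3 m hm]
      constructor
      · rintro (⟨a, b, ⟨hab, hbL, hwin⟩, hlm⟩ | ⟨hmL, hsf⟩)
        · refine ⟨a, b, ⟨hab, by simp only [hlen]; omega, ?_⟩, hlm⟩
          intro k hk1 hk2
          rw [hidxL k (by omega), hidxL a (by omega)]
          exact hwin k hk1 hk2
        · simp only [hlen] at hmL
          refine ⟨xs.length + 1 - m, xs.length, ⟨by omega, by simp only [hlen]; omega, ?_⟩, by omega⟩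
          intro k hk1 hk2
          have h1 := hsf k (by simp only [hlen]; omega) (by simp only [hlen]; omega)
          simp only [hlen] at h1
          exact h1
      · rintro ⟨a, b, ⟨hab, hbL, hwin⟩, hlm⟩
        simp only [hlen] at hbL
        by_cases hbxs : b < xs.length
        · refine Or.inl ⟨a, b, ⟨hab, hbxs, ?_⟩, hlm⟩
          intro k hk1 hk2
          have h1 := hwin k hk1 hk2
          rw [hidxL k (by omega), hidxL a (by omega)] at h1
          exact h1
        · have hbeq : b = xs.length := by omega
          refine Or.inr ⟨by simp only [hlen]; omega, ?_⟩
          intro k hk1 hk2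
          simp only [hlen] at hk1 hk2 ⊢
          have ha : xs.length + 1 - m = a := by omega
          rw [ha]
          exact hwin k (by omega) (by omega)

lemma B_iff (l : List Int) (n : Int) :
    hayMesetaDeLong_alt l n = true ↔ ∃ a b : Nat, Win l a b ∧ n = (b : Int) - (a : Int) + 1 := by
  simp only [hayMesetaDeLong_alt, decide_eq_true_eq]
  obtain ⟨-, ⟨hc0, hcb⟩, -, hP4⟩ := foldB l
  constructor
  · rintro ⟨h1, h2⟩
    obtain ⟨a, b, hw, hlm⟩ := (hP4 n.toNat (by omega)).mp (by omega)
    exact ⟨a, b, hw, by omega⟩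
  · rintro ⟨a, b, hw, hn⟩
    have hab : a ≤ b := hw.1
    have h1 : 1 ≤ n := by omega
    have h2 := (hP4 n.toNat (by omega)).mpr ⟨a, b, hw, by omega⟩
    exact ⟨h1, by omega⟩

-- ===== VERDICT (by name: the statement is the Claim_ definition above) =====
theorem hayMesetaDeLong_spec : Claim_equal_hayMesetaDeLong := by
  intro l n _
  unfold Spec_hayMesetaDeLong
  rw [Bool.eq_iff_iff]
  exact (A_iff l n).trans (B_iff l n).symm
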